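-- pv_equiv track=rewrite | github.com/rails-to-cosmos/force | w2pb/classes/processor.py | __group_results__
-- ===== SOURCE A (Python) =====
-- def __group_results__(results):
--     groupped = list()
--     for param in results:
--         param_name = param[0]
--         param_vals = param[1]
--         for param_id, param_val in enumerate(param_vals):
--             if groupped.__len__() > param_id:
--                 groupped[param_id][param_name] = param_val
--             else:
--                 groupped.append({param_name: param_val})
--     return groupped
-- ===== SOURCE B (Python) =====
-- def __group_results__(results):
--     n = max((len(param[1]) for param in results), default=0)
--     return [{param[0]: param[1][i] for param in results if i < len(param[1])}
--             for i in range(n)]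
-- ===== Notes on version B (the rewrite author's own statement) =====
-- stated objective: alternative
-- what changed: Position-major transpose: B computes the max value-list length once and builds each output dict in one comprehension per position, instead of A's param-major loop that grows the list and mutates earlier dicts in place.
import Mathlib
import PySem

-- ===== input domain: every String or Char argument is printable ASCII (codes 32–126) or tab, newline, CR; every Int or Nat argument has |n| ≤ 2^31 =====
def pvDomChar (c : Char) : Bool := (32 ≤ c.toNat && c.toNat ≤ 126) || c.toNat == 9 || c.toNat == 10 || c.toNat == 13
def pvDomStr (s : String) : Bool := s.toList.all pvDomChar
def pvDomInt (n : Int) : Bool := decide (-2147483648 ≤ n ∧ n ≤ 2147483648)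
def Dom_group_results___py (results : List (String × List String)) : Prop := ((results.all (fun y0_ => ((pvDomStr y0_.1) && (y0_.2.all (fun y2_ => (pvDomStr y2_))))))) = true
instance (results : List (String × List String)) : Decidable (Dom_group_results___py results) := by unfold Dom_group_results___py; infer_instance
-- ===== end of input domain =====

-- B transposes position-major (one dict comprehension per position) instead of A's param-major
-- in-place growth; same cost, different decomposition; return values proved equal on all inputs.


-- ===== PORT A =====
-- for param in results: for param_id, param_val in enumerate(param[1]):
--   if len(groupped) > param_id: groupped[param_id][param_name] = param_val
--   else: groupped.append({param_name: param_val})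
-- (param_id from enumerate is ≥ 0, so .toNat on it is exact)
def group_results___py (results : List (String × List String)) : List (List (String × String)) :=
  (results.foldl (fun groupped param =>
      (PySem.List.enumerate param.2).foldl (fun g pv =>
          if (g.length : Int) > pv.1 then
            g.modify pv.1.toNat (fun d => d.insert param.1 pv.2)
          else
            g ++ [PySem.Dict.ofList [(param.1, pv.2)]])
        groupped)
    ([] : List (PySem.Dict String String))).map (fun d => d.items)

-- ===== PORT B =====
-- n = max((len(param[1]) for param in results), default=0)
-- [{param[0]: param[1][i] for param in results if i < len(param[1])} for i in range(n)]
-- (i ∈ range(n) and i < len(param[1]) guard the subscript, so pyGetD's default is unreachable)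
def group_results___py_alt (results : List (String × List String)) : List (List (String × String)) :=
  let n := PySem.List.maxD (results.map (fun param => ((param.2.length : Int)))) (fun x => x) 0
  (PySem.List.pyRange 0 n 1).map (fun i =>
    (results.foldl (fun d param =>
        if i < (param.2.length : Int) then d.insert param.1 (PySem.List.pyGetD param.2 i "") else d)
      (PySem.Dict.empty : PySem.Dict String String)).items)

-- ===== PRECONDITION & SPEC =====
def Spec_group_results___py (results : List (String × List String)) (out : List (List (String × String))) : Prop := out = group_results___py_alt results
instance (results : List (String × List String)) (out : List (List (String × String))) : Decidable (Spec_group_results___py results out) := by unfold Spec_group_results___py; infer_instance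

-- ===== CLAIM (what is proved, stated in full; the proofs are below) =====
def Claim_equal_group_results___py : Prop := ∀ (results : List (String × List String)), Dom_group_results___py results → Spec_group_results___py results (group_results___py results)

-- ===== LEMMAS AND PROOFS =====
def pvStep (a : String) (g : List (PySem.Dict String String)) (pv : Int × String) :
    List (PySem.Dict String String) :=
  if (g.length : Int) > pv.1 then
    g.modify pv.1.toNat (fun d => d.insert a pv.2)
  else
    g ++ [PySem.Dict.ofList [(a, pv.2)]]

lemma pvMap_getD_range {α : Type} (g : List α) (d : α) :
    (List.range g.length).map (fun i => g.getD i d) = g := by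
  apply List.ext_getElem
  · simp
  · intro i h1 h2
    simp [List.getElem?_eq_getElem h2]

lemma pvInner (a : String) : ∀ (tail : List String) (t : Nat) (g : List (PySem.Dict String String)),
    t ≤ g.length →
    (PySem.List.enumerate tail (t : Int)).foldl (pvStep a) g
      = (List.range (max g.length (t + tail.length))).map
          (fun i => if t ≤ i ∧ i < t + tail.length
                    then (g.getD i PySem.Dict.empty).insert a (tail.getD (i - t) "")
                    else g.getD i PySem.Dict.empty) := by
  intro tail
  induction tail with
  | nil =>
    intro t g ht
    rw [PySem.List.enumerate_nil]
    have hm : max g.length (t + ([] : List String).length) = g.length := by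
      simp only [List.length_nil]; omega
    rw [List.foldl_nil, hm]
    calc g = (List.range g.length).map (fun i => g.getD i PySem.Dict.empty) := (pvMap_getD_range g _).symm
      _ = _ := by
        apply List.map_congr_left
        intro i hi
        rw [if_neg (by simp only [List.length_nil]; omega)]
  | cons v vs ih =>
    intro t g ht
    rw [PySem.List.enumerate_cons, List.foldl_cons]
    by_cases hlt : t < g.length
    · -- modify branch
      have hstep : pvStep a g ((t : Int), v) = g.modify t (fun d => d.insert a v) := by
        simp [pvStep, hlt]
      rw [hstep]
      have hcast : ((t : Int) + 1) = (((t + 1 : Nat)) : Int) := by push_cast; ring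
      rw [hcast, ih (t + 1) _ (by simpa [List.length_modify] using hlt)]
      have hb : max (g.modify t (fun d => d.insert a v)).length (t + 1 + vs.length)
          = max g.length (t + (v :: vs).length) := by
        simp [List.length_modify]; omega
      rw [hb]
      apply List.map_congr_left
      intro i hi
      rw [List.mem_range] at hi
      simp only [List.length_cons, List.length_append, List.length_modify,
        List.length_singleton] at hi ⊢
      have hgd : (g.modify t (fun d => d.insert a v)).getD i PySem.Dict.empty
          = if t = i then (g.getD i PySem.Dict.empty).insert a v else g.getD i PySem.Dict.empty := by
        simp only [List.getD, List.getElem?_modify]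
        rcases lt_or_ge i g.length with h | h
        · rw [List.getElem?_eq_getElem h]
          split_ifs <;> simp
        · rw [List.getElem?_eq_none (by simpa using h)]
          have : ¬ t = i := by omega
          simp [this]
      rw [hgd]
      rcases Nat.lt_trichotomy i t with h | h | h
      · rw [if_neg (by omega), if_neg (by omega), if_neg (by omega)]
      · subst h
        rw [if_neg (by omega), if_pos rfl, if_pos (by omega)]
        simp
      · have h1 : i - t = (i - (t+1)) + 1 := by omega
        by_cases h2 : i < t + 1 + vs.length
        · rw [if_pos (by omega), if_neg (by omega), if_pos (by omega), h1]
          simp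
        · rw [if_neg (by omega), if_neg (by omega), if_neg (by omega)]
    · -- append branch
      have hteq : t = g.length := by omega
      have hstep : pvStep a g ((t : Int), v) = g ++ [PySem.Dict.ofList [(a, v)]] := by
        simp [pvStep]; omega
      rw [hstep]
      have hcast : ((t : Int) + 1) = (((t + 1 : Nat)) : Int) := by push_cast; ring
      rw [hcast, ih (t + 1) _ (by simp [hteq])]
      have hb : max (g ++ [PySem.Dict.ofList [(a, v)]]).length (t + 1 + vs.length)
          = max g.length (t + (v :: vs).length) := by
        simp [hteq]; omega
      rw [hb]
      apply List.map_congr_left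
      intro i hi
      rw [List.mem_range] at hi
      simp only [List.length_cons, List.length_append, List.length_modify,
        List.length_singleton] at hi ⊢
      have hgd : (g ++ [PySem.Dict.ofList [(a, v)]]).getD i PySem.Dict.empty
          = if i = t then PySem.Dict.ofList [(a, v)] else g.getD i PySem.Dict.empty := by
        simp only [List.getD]
        rcases lt_or_ge i g.length with h | h
        · rw [List.getElem?_append_left h, if_neg (by omega)]
        · rw [List.getElem?_append_right h]
          by_cases h2 : i = t
          · subst h2; rw [hteq]; simp
          · have h3 : 1 ≤ i - g.length := by omega
            rw [List.getElem?_eq_none (by simpa using h3), List.getElem?_eq_none (by omega)]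
            simp [h2]
      rw [hgd]
      have hofL : PySem.Dict.ofList [(a, v)] = PySem.Dict.empty.insert a v := rfl
      rcases Nat.lt_trichotomy i t with h | h | h
      · rw [if_neg (by omega), if_neg (by omega), if_neg (by omega)]
      · subst h
        rw [if_neg (by omega), if_pos rfl, if_pos (by omega), hofL]
        have hget : g.getD i PySem.Dict.empty = PySem.Dict.empty := by
          rw [List.getD_eq_default]; omega
        rw [hget]
        simp
      · have h1 : i - t = (i - (t+1)) + 1 := by omega
        have hge : g.getD i PySem.Dict.empty = PySem.Dict.empty := by
          rw [List.getD_eq_default]; omega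
        by_cases h2 : i < t + 1 + vs.length
        · rw [if_pos (by omega), if_neg (by omega), if_pos (by omega), hge, h1]
          simp [hge]
        · rw [if_neg (by omega), if_neg (by omega), if_neg (by omega)]

def pvRow (results : List (String × List String)) (i : Int) : PySem.Dict String String :=
  results.foldl (fun d param =>
      if i < (param.2.length : Int) then d.insert param.1 (PySem.List.pyGetD param.2 i "") else d)
    PySem.Dict.empty

def pvN (results : List (String × List String)) : Nat :=
  results.foldl (fun m param => max m param.2.length) 0

lemma pvGetD_map_range {α : Type} (f : Nat → α) (n i : Nat) (d : α) :
    ((List.range n).map f).getD i d = if i < n then f i else d := by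
  rcases lt_or_ge i n with h | h
  · rw [List.getD_eq_getElem _ _ (by simpa using h)]
    simp [h]
  · rw [List.getD_eq_default _ _ (by simpa using h)]
    rw [if_neg (by omega)]

lemma pvN_append (rs : List (String × List String)) (p : String × List String) :
    pvN (rs ++ [p]) = max (pvN rs) p.2.length := by
  simp [pvN, List.foldl_append]

lemma pvRow_append (rs : List (String × List String)) (p : String × List String) (i : Int) :
    pvRow (rs ++ [p]) i =
      if i < (p.2.length : Int) then (pvRow rs i).insert p.1 (PySem.List.pyGetD p.2 i "")
      else pvRow rs i := by
  simp [pvRow, List.foldl_append]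

lemma pvRow_of_ge (rs : List (String × List String)) (i : Int)
    (h : ∀ p ∈ rs, (p.2.length : Int) ≤ i) : pvRow rs i = PySem.Dict.empty := by
  have key : ∀ (rs : List (String × List String)) (d0 : PySem.Dict String String),
      (∀ p ∈ rs, (p.2.length : Int) ≤ i) →
      rs.foldl (fun d param =>
        if i < (param.2.length : Int) then d.insert param.1 (PySem.List.pyGetD param.2 i "") else d) d0 = d0 := by
    intro rs
    induction rs with
    | nil => intro d0 _; rfl
    | cons p t ih =>
      intro d0 hh
      have hp : ¬ (i < (p.2.length : Int)) := by
        have := hh p (by simp); omega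
      simp only [List.foldl_cons, if_neg hp]
      exact ih d0 (fun q hq => hh q (List.mem_cons_of_mem _ hq))
  exact key rs _ h

lemma pvState (rs : List (String × List String)) :
    rs.foldl (fun g p => (PySem.List.enumerate p.2).foldl (pvStep p.1) g) []
      = (List.range (pvN rs)).map (fun i : Nat => pvRow rs (i : Int)) := by
  induction rs using List.reverseRecOn with
  | nil => rfl
  | append_singleton rs p ih =>
    rw [List.foldl_append, List.foldl_cons, List.foldl_nil, ih]
    have hlen : ((List.range (pvN rs)).map (fun i : Nat => pvRow rs (i : Int))).length = pvN rs := by simp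
    have hin := pvInner p.1 p.2 0 ((List.range (pvN rs)).map (fun i : Nat => pvRow rs (i : Int))) (by omega)
    simp only [Nat.cast_zero, Nat.zero_add, hlen] at hin
    rw [hin, pvN_append]
    have hmax : ∀ q ∈ rs, q.2.length ≤ pvN rs :=
      (PySem.List.le_foldl_max_nat rs (fun q => q.2.length) 0).2
    apply List.map_congr_left
    intro i hi
    rw [List.mem_range] at hi
    have hS : ((List.range (pvN rs)).map (fun i : Nat => pvRow rs (i : Int))).getD i PySem.Dict.empty
        = pvRow rs (i : Int) := by
      rw [pvGetD_map_range]
      split_ifs with h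
      · rfl
      · exact (pvRow_of_ge rs (i : Int) (fun q hq => by
          have := hmax q hq; omega)).symm
    rw [hS, pvRow_append]
    rcases lt_or_ge i p.2.length with h | h
    · rw [if_pos (by omega), if_pos (by exact_mod_cast h)]
      rw [PySem.List.pyGetD_natCast]
      simp
    · rw [if_neg (by omega), if_neg (by exact_mod_cast Nat.not_lt.mpr h)]

lemma pvMaxD_int (ls : List Nat) :
    PySem.List.maxD (ls.map (fun n : Nat => (n : Int))) (fun x => x) 0 = ((ls.foldl max 0 : Nat) : Int) := by
  have h2 : ∀ (t : List Nat) (a : Nat),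
      (t.map (fun n : Nat => (n:Int))).foldl max (a:Int) = ((t.foldl max a : Nat) : Int) := by
    intro t
    induction t with
    | nil => intro a; rfl
    | cons b t ih =>
      intro a
      simp only [List.map_cons, List.foldl_cons]
      rw [show max (a:Int) (b:Int) = ((max a b : Nat) : Int) from (Nat.cast_max a b).symm]
      exact ih (max a b)
  cases ls with
  | nil => rfl
  | cons n t =>
    have h1 : PySem.List.max? ((n :: t).map (fun n : Nat => (n : Int))) (fun x => x)
        = some ((t.map (fun n : Nat => (n:Int))).foldl max (n:Int)) := by
      simpa using PySem.List.max?_id_cons (x := (n:Int)) (t := t.map (fun n : Nat => (n:Int)))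
    rw [PySem.List.maxD, h1, Option.getD_some, h2]
    norm_num

theorem pvAB (results : List (String × List String)) :
    ((results.foldl (fun groupped param =>
      (PySem.List.enumerate param.2).foldl (fun g pv =>
          if (g.length : Int) > pv.1 then
            g.modify pv.1.toNat (fun d => d.insert param.1 pv.2)
          else
            g ++ [PySem.Dict.ofList [(param.1, pv.2)]])
        groupped)
    ([] : List (PySem.Dict String String))).map (fun d => d.items))
    =
    (let n := PySem.List.maxD (results.map (fun param => ((param.2.length : Int)))) (fun x => x) 0
     (PySem.List.pyRange 0 n 1).map (fun i =>
       (results.foldl (fun d param =>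
           if i < (param.2.length : Int) then d.insert param.1 (PySem.List.pyGetD param.2 i "") else d)
         (PySem.Dict.empty : PySem.Dict String String)).items)) := by
  have hA : ((results.foldl (fun g p => (PySem.List.enumerate p.2).foldl (pvStep p.1) g)
        ([] : List (PySem.Dict String String))).map (fun d => d.items))
      = (List.range (pvN results)).map (fun i : Nat => (pvRow results (i : Int)).items) := by
    rw [pvState, List.map_map]
    rfl
  have hn : PySem.List.maxD (results.map (fun param => ((param.2.length : Int)))) (fun x => x) 0
      = ((pvN results : Nat) : Int) := by
    have h1 : results.map (fun param => ((param.2.length : Int)))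
        = (results.map (fun param => param.2.length)).map (fun n : Nat => (n : Int)) := by
      rw [List.map_map]; rfl
    rw [h1, pvMaxD_int]
    congr 1
    rw [pvN, List.foldl_map]
  show _ = (PySem.List.pyRange 0 (PySem.List.maxD (results.map (fun param => ((param.2.length : Int)))) (fun x => x) 0) 1).map _
  rw [hn, PySem.List.pyRange_zero_natCast, List.map_map]
  exact hA

-- ===== VERDICT (by name: the statement is the Claim_ definition above) =====
theorem group_results___py_spec : Claim_equal_group_results___py := by
  intro results _
  unfold Spec_group_results___py
  exact pvAB results
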